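-- pv_equiv track=rewrite | github.com/dengguojie/vue-element-admin | auto_schedule/python/lang/dynamic/schedule/reduce_tilingcase.py | find_last_none_reduce_axis
-- ===== SOURCE A (Python) =====
-- from typing import List
-- from typing import Tuple
-- from typing import Optional
--
-- def find_last_none_reduce_axis(shape_before_reduce: list,
--                                reduce_axis_index: List[int]) -> Tuple[Optional[int], Optional[int]]:
--     """
--     :param shape_before_reduce
--     :param reduce_axis_index
--     :return the last axis or the last serials axises that are not in reduce_axis
--     """
--     # shape_before_reduce:(ak+1,rk,...,r2,a2,r1,a1) or (ak,rk,...,r2,a1,r1)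
--     # find a1 position, a1 may contain continues axis
--     a1_end_index = None
--     for i in range(len(shape_before_reduce) - 1, -1, -1):
--         if i not in reduce_axis_index:
--             a1_end_index = i
--             break
--     a1_start_index = a1_end_index
--     if a1_end_index is None:
--         return a1_start_index, a1_end_index
--     for i in range(a1_end_index, -1, -1):
--         if i in reduce_axis_index:
--             a1_start_index = i + 1
--             break
--         if i == 0:
--             a1_start_index = i
--
--     return a1_start_index, a1_end_index
-- ===== SOURCE B (Python) =====
-- from itertools import groupby
--
--
-- def find_last_none_reduce_axis(shape_before_reduce, reduce_axis_index):
--     reduce_set = set(reduce_axis_index)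
--     result = (None, None)
--     for is_reduce, run in groupby(range(len(shape_before_reduce)),
--                                   key=lambda i: i in reduce_set):
--         if not is_reduce:
--             g = list(run)
--             result = (g[0], g[-1])
--     return result
-- ===== Notes on version B (the rewrite author's own statement) =====
-- stated objective: faster
-- what changed: Replaces A's two backward scans with repeated list-membership tests by a single forward pass that builds the reduce set once and partitions the axis indices into maximal contiguous runs of equal reduce-membership via itertools.groupby, keeping the first/last index of the last non-reduce run.
import Mathlib
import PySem

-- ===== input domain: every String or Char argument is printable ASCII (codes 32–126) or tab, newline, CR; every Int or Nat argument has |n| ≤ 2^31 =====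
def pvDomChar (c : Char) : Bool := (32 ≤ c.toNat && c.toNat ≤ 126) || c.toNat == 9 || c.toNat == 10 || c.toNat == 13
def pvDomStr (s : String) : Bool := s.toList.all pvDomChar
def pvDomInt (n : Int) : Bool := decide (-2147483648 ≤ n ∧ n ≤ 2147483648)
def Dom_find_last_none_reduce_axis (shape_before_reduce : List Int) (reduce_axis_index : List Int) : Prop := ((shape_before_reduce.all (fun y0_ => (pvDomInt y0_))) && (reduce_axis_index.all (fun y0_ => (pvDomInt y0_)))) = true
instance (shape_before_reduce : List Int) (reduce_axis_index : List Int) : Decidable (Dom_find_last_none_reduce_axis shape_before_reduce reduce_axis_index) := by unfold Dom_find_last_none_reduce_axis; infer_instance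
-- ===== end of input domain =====

-- B replaces A's two backward scans by one forward groupby pass over maximal runs of
-- equal reduce-membership over a set built once, keeping the last non-reduce run (faster: no repeated list-membership scans).

-- ===== PORT A =====
-- first loop: for i in range(len(shape)-1, -1, -1): if i not in reduce: a1_end_index = i; break
def pvLoopEnd (reduce_axis_index : List Int) : List Int → Option Int
  | [] => none
  | i :: rest =>
      if reduce_axis_index.contains i then pvLoopEnd reduce_axis_index rest else some i

-- second loop: for i in range(a1_end_index, -1, -1): if i in reduce: start = i+1; break; if i == 0: start = i
def pvLoopStart (reduce_axis_index : List Int) (start : Int) : List Int → Int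
  | [] => start
  | i :: rest =>
      if reduce_axis_index.contains i then i + 1
      else if i = 0 then pvLoopStart reduce_axis_index i rest
      else pvLoopStart reduce_axis_index start rest

def find_last_none_reduce_axis (shape_before_reduce : List Int) (reduce_axis_index : List Int) : Option Int × Option Int :=
  match pvLoopEnd reduce_axis_index (PySem.List.pyRange ((shape_before_reduce.length : Int) - 1) (-1) (-1)) with
  | none => (none, none)
  | some e => (some (pvLoopStart reduce_axis_index e (PySem.List.pyRange e (-1) (-1))), some e)

-- ===== PORT B =====
-- itertools.groupby over the index list: maximal runs of equal key, front to back
def pvGroupRuns (key : Int → Bool) : List Int → List (Bool × List Int)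
  | [] => []
  | x :: xs =>
    match pvGroupRuns key xs with
    | [] => [(key x, [x])]
    | (k, g) :: rest => if key x = k then (k, x :: g) :: rest else (key x, [x]) :: (k, g) :: rest

def find_last_none_reduce_axis_alt (shape_before_reduce : List Int) (reduce_axis_index : List Int) : Option Int × Option Int :=
  (pvGroupRuns (fun i => PySem.Set.contains (PySem.Set.ofList reduce_axis_index) i)
      (PySem.List.pyRange 0 (shape_before_reduce.length : Int) 1)).foldl
    (fun res r => if r.1 then res else (r.2.head?, r.2.getLast?)) (none, none)

-- ===== PRECONDITION & SPEC =====
def Spec_find_last_none_reduce_axis (shape_before_reduce : List Int) (reduce_axis_index : List Int) (out : Option Int × Option Int) : Prop := out = find_last_none_reduce_axis_alt shape_before_reduce reduce_axis_index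
instance (shape_before_reduce : List Int) (reduce_axis_index : List Int) (out : Option Int × Option Int) : Decidable (Spec_find_last_none_reduce_axis shape_before_reduce reduce_axis_index out) := by unfold Spec_find_last_none_reduce_axis; infer_instance

-- ===== CLAIM (what is proved, stated in full; the proofs are below) =====
def Claim_equal_find_last_none_reduce_axis : Prop := ∀ (shape_before_reduce : List Int) (reduce_axis_index : List Int), Dom_find_last_none_reduce_axis shape_before_reduce reduce_axis_index → Spec_find_last_none_reduce_axis shape_before_reduce reduce_axis_index (find_last_none_reduce_axis shape_before_reduce reduce_axis_index)

-- ===== LEMMAS AND PROOFS =====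

-- appending one element at the back of the grouped list
def pvPush : List (Bool × List Int) → Bool → Int → List (Bool × List Int)
  | [], kx, x => [(kx, [x])]
  | [(k, g)], kx, x => if kx = k then [(k, g ++ [x])] else [(k, g), (kx, [x])]
  | r :: s :: rest, kx, x => r :: pvPush (s :: rest) kx x

theorem pvGroupRuns_ne_nil (key : Int → Bool) (l : List Int) (h : l ≠ []) :
    pvGroupRuns key l ≠ [] := by
  cases l with
  | nil => exact absurd rfl h
  | cons x xs =>
    simp only [pvGroupRuns]
    rcases hr : pvGroupRuns key xs with _ | ⟨⟨k, g⟩, rest⟩ <;> simp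
    split <;> simp

theorem pvGroupRuns_groups_ne_nil (key : Int → Bool) (l : List Int) :
    ∀ r ∈ pvGroupRuns key l, r.2 ≠ [] := by
  induction l with
  | nil => simp [pvGroupRuns]
  | cons x xs ih =>
    simp only [pvGroupRuns]
    rcases hr : pvGroupRuns key xs with _ | ⟨⟨k, g⟩, rest⟩
    · simp
    · rw [hr] at ih
      by_cases h : key x = k
      · simp only [if_pos h]
        intro r hrm
        rw [List.mem_cons] at hrm
        rcases hrm with rfl | hrm
        · simp
        · exact ih _ (List.mem_cons_of_mem _ hrm)
      · simp only [if_neg h]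
        intro r hrm
        rw [List.mem_cons] at hrm
        rcases hrm with rfl | hrm
        · simp
        · exact ih _ hrm

theorem pvGroupRuns_append_single (key : Int → Bool) (l : List Int) (x : Int) :
    pvGroupRuns key (l ++ [x]) = pvPush (pvGroupRuns key l) (key x) x := by
  induction l with
  | nil => simp [pvGroupRuns, pvPush]
  | cons a l ih =>
    simp only [List.cons_append, pvGroupRuns, ih]
    rcases hr : pvGroupRuns key l with _ | ⟨⟨k, g⟩, rest⟩
    · have hl : l = [] := by
        by_contra h; exact pvGroupRuns_ne_nil key l h hr
      subst hl
      simp only [pvPush]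
      by_cases h : key a = key x
      · simp [h]
      · have h' : ¬ key x = key a := fun e => h e.symm
        simp [h, h']
    · rcases rest with _ | ⟨s, rest'⟩
      · simp only [pvPush]
        by_cases hka : key a = k <;> by_cases hkx : key x = k
        all_goals simp_all [pvPush, eq_comm]
      · simp only [pvPush]
        by_cases hka : key a = k <;> simp [hka, pvPush]

theorem pvGroupRuns_getLast_key (key : Int → Bool) (l : List Int) (x : Int)
    (h : l.getLast? = some x) :
    ∃ g, (pvGroupRuns key l).getLast? = some (key x, g) := by
  induction l with
  | nil => simp at h
  | cons a l ih =>
    cases l with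
    | nil =>
      simp at h; subst h
      exact ⟨[a], rfl⟩
    | cons b l' =>
      rw [List.getLast?_cons_cons] at h
      obtain ⟨g, hg⟩ := ih h
      rw [show pvGroupRuns key (a :: b :: l') = (match pvGroupRuns key (b :: l') with
        | [] => [(key a, [a])]
        | (k, g) :: rest => if key a = k then (k, a :: g) :: rest else (key a, [a]) :: (k, g) :: rest) from rfl]
      rcases hr : pvGroupRuns key (b :: l') with _ | ⟨⟨k, g0⟩, rest⟩
      · exact absurd hr (pvGroupRuns_ne_nil key _ (by simp))
      · rw [hr] at hg
        rcases rest with _ | ⟨s, rest'⟩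
        · simp at hg
          by_cases hka : key a = k
          · exact ⟨a :: g0, by simp [hka, hg.1]⟩
          · rw [hg.1] at hka
            exact ⟨g0, by simp [hg.1, hg.2, hka]⟩
        · rw [List.getLast?_cons_cons] at hg
          by_cases hka : key a = k
          · exact ⟨g, by simp only [if_pos hka, List.getLast?_cons_cons]; exact hg⟩
          · exact ⟨g, by simp only [if_neg hka, List.getLast?_cons_cons]; exact hg⟩

theorem pvFoldl_push (runs : List (Bool × List Int)) (acc : Option Int × Option Int)
    (kx : Bool) (x : Int) (hne : ∀ r ∈ runs, r.2 ≠ []) :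
    (pvPush runs kx x).foldl (fun res r => if r.1 then res else (r.2.head?, r.2.getLast?)) acc =
      if kx then runs.foldl (fun res r => if r.1 then res else (r.2.head?, r.2.getLast?)) acc
      else match runs.getLast? with
        | some (false, _) =>
            ((runs.foldl (fun res r => if r.1 then res else (r.2.head?, r.2.getLast?)) acc).1, some x)
        | _ => (some x, some x) := by
  induction runs generalizing acc with
  | nil =>
    cases kx <;> simp [pvPush]
  | cons r rest ih =>
    cases rest with
    | nil =>
      obtain ⟨k, g⟩ := r
      have hg : g ≠ [] := hne (k, g) (by simp)
      cases g with
      | nil => exact absurd rfl hg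
      | cons a g' =>
        have hcat : ((a :: g') ++ [x]).getLast? = some x := List.getLast?_concat
        simp only [List.cons_append] at hcat
        cases k <;> cases kx <;> simp [pvPush, hcat]
    | cons s rest' =>
      have hne' : ∀ r' ∈ s :: rest', r'.2 ≠ [] := fun r' hr' => hne r' (by simp [hr'])
      rw [show pvPush (r :: s :: rest') kx x = r :: pvPush (s :: rest') kx x from rfl]
      rw [List.foldl_cons, ih _ hne', List.foldl_cons,
          List.getLast?_cons_cons]
      rfl

theorem pvLoopStart_indep (ra : List Int) (k : Nat) (s s' : Int) :
    pvLoopStart ra s (PySem.List.pyRange (k : Int) (-1) (-1)) =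
    pvLoopStart ra s' (PySem.List.pyRange (k : Int) (-1) (-1)) := by
  induction k generalizing s s' with
  | zero =>
    rw [PySem.List.pyRange_neg_one_cons (by omega), PySem.List.pyRange_neg_one_eq_nil (by omega)]
    simp only [pvLoopStart, Nat.cast_zero]
    split <;> rfl
  | succ k ih =>
    rw [PySem.List.pyRange_neg_one_cons (by push_cast; omega)]
    have h1 : ((k + 1 : Nat) : Int) - 1 = (k : Int) := by push_cast; ring
    rw [h1]
    simp only [pvLoopStart]
    split
    · rfl
    · rw [if_neg (by push_cast; omega), if_neg (by push_cast; omega)]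
      exact ih s s'

theorem pvMain (ra : List Int) (n : Nat) :
    (pvGroupRuns (fun i => ra.contains i) (PySem.List.pyRange 0 (n : Int) 1)).foldl
      (fun res r => if r.1 then res else (r.2.head?, r.2.getLast?)) (none, none) =
    (match pvLoopEnd ra (PySem.List.pyRange ((n : Int) - 1) (-1) (-1)) with
      | none => (none, none)
      | some e => (some (pvLoopStart ra e (PySem.List.pyRange e (-1) (-1))), some e)) := by
  induction n with
  | zero =>
    rw [show ((0 : Nat) : Int) = 0 from rfl,
        PySem.List.pyRange_one_eq_nil (by omega),
        show (0 : Int) - 1 = -1 from by ring,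
        PySem.List.pyRange_neg_one_eq_nil (by omega)]
    rfl
  | succ n ih =>
    have hcast : ((n + 1 : Nat) : Int) = (n : Int) + 1 := by push_cast; ring
    rw [hcast, PySem.List.pyRange_one_succ_right (by omega),
        pvGroupRuns_append_single,
        pvFoldl_push _ _ _ _ (pvGroupRuns_groups_ne_nil _ _),
        show (n : Int) + 1 - 1 = (n : Int) from by ring,
        PySem.List.pyRange_neg_one_cons (by omega)]
    cases hk : ra.contains (n : Int) with
    | true =>
      simp only [hk, if_true, pvLoopEnd]
      exact ih
    | false =>
      simp only [hk, Bool.false_eq_true, if_false, pvLoopEnd]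
      cases n with
      | zero =>
        rw [show ((0 : Nat) : Int) = 0 from rfl, PySem.List.pyRange_one_eq_nil (by omega)]
        simp only [pvGroupRuns, List.getLast?_nil]
        rw [PySem.List.pyRange_neg_one_cons (by omega), PySem.List.pyRange_neg_one_eq_nil (by omega)]
        have hk' : (0 : Int) ∉ ra := by simpa using hk
        simp [pvLoopStart, hk']
      | succ m =>
        have hm : ((m + 1 : Nat) : Int) = (m : Int) + 1 := by push_cast; ring
        have hm1 : ((m + 1 : Nat) : Int) - 1 = (m : Int) := by push_cast; ring
        have hne0 : ((m + 1 : Nat) : Int) ≠ 0 := by omega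
        have hlast : (PySem.List.pyRange 0 ((m + 1 : Nat) : Int) 1).getLast? = some (m : Int) := by
          rw [hm, PySem.List.pyRange_one_succ_right (by omega), List.getLast?_concat]
        obtain ⟨g, hg⟩ := pvGroupRuns_getLast_key (fun i => ra.contains i) _ _ hlast
        rw [hg]
        cases hk2 : ra.contains (m : Int) with
        | true =>
          rw [hk2] at hg
          rw [PySem.List.pyRange_neg_one_cons (show (-1 : Int) < ((m + 1 : Nat) : Int) by omega),
              hm1, PySem.List.pyRange_neg_one_cons (show (-1 : Int) < (m : Int) by omega)]
          have hk' : (m : Int) + 1 ∉ ra := by simpa [hm] using hk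
          have hk2' : (m : Int) ∈ ra := by simpa using hk2
          simp [pvLoopStart, hk', hk2', hm]
        | false =>
          have ih' := ih
          rw [hm1, PySem.List.pyRange_neg_one_cons (show (-1 : Int) < (m : Int) by omega)] at ih'
          simp only [pvLoopEnd, hk2, Bool.false_eq_true, if_false] at ih'
          rw [hk2] at hg
          rw [ih']
          rw [PySem.List.pyRange_neg_one_cons (show (-1 : Int) < ((m + 1 : Nat) : Int) by omega),
              hm1]
          simp only [pvLoopStart, hk, Bool.false_eq_true, if_false, if_neg hne0]
          exact congrArg (fun z => (some z, some ((m + 1 : Nat) : Int)))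
            (pvLoopStart_indep ra m (m : Int) ((m + 1 : Nat) : Int))

theorem pvContains_ofList (ra : List Int) (i : Int) :
    PySem.Set.contains (PySem.Set.ofList ra) i = ra.contains i := by
  simp [pysem]

-- ===== VERDICT (by name: the statement is the Claim_ definition above) =====
theorem find_last_none_reduce_axis_spec : Claim_equal_find_last_none_reduce_axis := by
  intro shape ra _
  unfold Spec_find_last_none_reduce_axis find_last_none_reduce_axis find_last_none_reduce_axis_alt
  have hk : (fun i => PySem.Set.contains (PySem.Set.ofList ra) i) = (fun i => ra.contains i) := by
    funext i; exact pvContains_ofList ra i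
  rw [hk]
  exact (pvMain ra shape.length).symm
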